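-- pv_equiv track=rewrite | github.com/MaxHalford/wedplan | scratch/experiment_adjacent_groups.py | are_contiguous
-- ===== SOURCE A (Python) =====
-- def are_contiguous(seats: list[int], capacity: int) -> bool:
--     """Check if seat indices form a contiguous block around circular table."""
--     if len(seats) <= 1:
--         return True
--
--     sorted_seats = sorted(seats)
--
--     # Check normal contiguous (no wrap)
--     normal_contiguous = all(sorted_seats[i + 1] - sorted_seats[i] == 1 for i in range(len(sorted_seats) - 1))
--     if normal_contiguous:
--         return True
--
--     # Check wrap-around contiguous
--     gaps = []
--     for i in range(len(sorted_seats) - 1):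
--         gaps.append(sorted_seats[i + 1] - sorted_seats[i])
--     wrap_gap = capacity - sorted_seats[-1] + sorted_seats[0]
--     gaps.append(wrap_gap)
--
--     large_gaps = [g for g in gaps if g > 1]
--     return len(large_gaps) <= 1
-- ===== SOURCE B (Python) =====
-- def are_contiguous(seats: list[int], capacity: int) -> bool:
--     """Check if seat indices form a contiguous block around circular table."""
--     if len(seats) <= 1:
--         return True
--     ss = set(seats)
--     lo = min(seats)
--     hi = max(seats)
--     inner_breaks = sum(1 for s in ss if s != lo and s - 1 not in ss)
--     wrap_break = 1 if capacity - hi + lo > 1 else 0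
--     return inner_breaks + wrap_break <= 1
-- ===== Notes on version B (the rewrite author's own statement) =====
-- stated objective: alternative
-- what changed: B replaces sorting plus two gap-scan passes by a hash set: one pass counts run-starts (elements s != min with s-1 absent from the set) and a wrap-gap flag is computed from min/max; O(n) hashing instead of A's sort, though not measured faster on the probe's input family.
import Mathlib
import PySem

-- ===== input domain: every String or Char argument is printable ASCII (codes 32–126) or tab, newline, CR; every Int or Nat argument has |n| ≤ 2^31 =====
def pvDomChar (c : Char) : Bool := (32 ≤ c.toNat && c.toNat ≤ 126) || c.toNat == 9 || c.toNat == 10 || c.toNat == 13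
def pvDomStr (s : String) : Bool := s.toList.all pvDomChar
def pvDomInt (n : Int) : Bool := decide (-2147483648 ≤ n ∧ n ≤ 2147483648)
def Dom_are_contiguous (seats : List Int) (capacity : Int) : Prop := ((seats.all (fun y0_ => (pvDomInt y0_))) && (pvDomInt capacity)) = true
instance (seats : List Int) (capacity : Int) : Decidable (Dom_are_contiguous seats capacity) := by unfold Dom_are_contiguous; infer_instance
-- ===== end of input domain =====

-- B replaces A's sort + two gap-scan passes by a one-pass hash-set run-start count (a different algorithm of similar measured cost).


-- ===== PORT A =====
def are_contiguous (seats : List Int) (capacity : Int) : Bool :=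
  if seats.length ≤ 1 then true
  else
    let sorted_seats := PySem.List.sorted seats (fun x => x) false
    let normal_contiguous := (PySem.List.pyRange 0 ((sorted_seats.length : Int) - 1) 1).all
      (fun i => PySem.List.pyGetD sorted_seats (i + 1) 0 - PySem.List.pyGetD sorted_seats i 0 == 1)
    if normal_contiguous then true
    else
      let gaps := (PySem.List.pyRange 0 ((sorted_seats.length : Int) - 1) 1).foldl
        (fun acc i => acc ++ [PySem.List.pyGetD sorted_seats (i + 1) 0 - PySem.List.pyGetD sorted_seats i 0]) []
      let wrap_gap := capacity - PySem.List.pyGetD sorted_seats (-1) 0 + PySem.List.pyGetD sorted_seats 0 0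
      let gaps2 := gaps ++ [wrap_gap]
      let large_gaps := gaps2.filter (fun g => 1 < g)
      decide ((large_gaps.length : Int) ≤ 1)

-- ===== PORT B =====
-- 'sum(1 for s in ss if …)' over the Python set is a pure count (order-independent), so folding
-- over the Set's list is exact; 'min(seats)'/'max(seats)' are min?/max? (nonempty here, so getD 0 never fires).
def are_contiguous_alt (seats : List Int) (capacity : Int) : Bool :=
  if seats.length ≤ 1 then true
  else
    let ss : PySem.Set Int := PySem.Set.ofList seats
    let lo := (PySem.List.min? seats (fun x => x)).getD 0
    let hi := (PySem.List.max? seats (fun x => x)).getD 0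
    let inner_breaks : Int := ss.foldl
      (fun acc s => if s ≠ lo ∧ s - 1 ∉ ss then acc + 1 else acc) 0
    let wrap_break : Int := if 1 < capacity - hi + lo then 1 else 0
    decide (inner_breaks + wrap_break ≤ 1)

-- ===== PRECONDITION & SPEC =====
def Spec_are_contiguous (seats : List Int) (capacity : Int) (out : Bool) : Prop := out = are_contiguous_alt seats capacity
instance (seats : List Int) (capacity : Int) (out : Bool) : Decidable (Spec_are_contiguous seats capacity out) := by unfold Spec_are_contiguous; infer_instance

-- ===== CLAIM (what is proved, stated in full; the proofs are below) =====
def Claim_equal_are_contiguous : Prop := ∀ (seats : List Int) (capacity : Int), Dom_are_contiguous seats capacity → Spec_are_contiguous seats capacity (are_contiguous seats capacity)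

-- ===== LEMMAS AND PROOFS =====

/-- Consecutive differences of a list, structurally. -/
def diffs : List Int → List Int
  | a :: b :: t => (b - a) :: diffs (b :: t)
  | _ => []

lemma range_map_diffs : ∀ (L : List Int),
    (List.range (L.length - 1)).map (fun k => L.getD (k + 1) 0 - L.getD k 0) = diffs L
  | [] => by simp [diffs]
  | [a] => by simp [diffs]
  | a :: b :: t => by
    have ih := range_map_diffs (b :: t)
    simp only [List.length_cons, Nat.add_sub_cancel, List.range_succ_eq_map, List.map_cons,
      List.map_map, diffs]
    congr 1

lemma pairwise_head_le (L : List Int) (h : L.Pairwise (· ≤ ·)) (hne : L ≠ []) :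
    ∀ y ∈ L, L.head hne ≤ y := by
  cases L with
  | nil => exact absurd rfl hne
  | cons a t =>
    intro y hy
    rcases List.mem_cons.1 hy with rfl | hy
    · exact le_refl y
    · exact (List.pairwise_cons.1 h).1 y hy

lemma pairwise_le_getLast : ∀ (L : List Int), L.Pairwise (· ≤ ·) → ∀ (hne : L ≠ []),
    ∀ y ∈ L, y ≤ L.getLast hne
  | [], _, hne => absurd rfl hne
  | [a], _, _ => by intro y hy; simp at hy; simp [hy]
  | a :: b :: t, h, _ => by
    intro y hy
    have h' := (List.pairwise_cons.1 h).2
    have ih := pairwise_le_getLast (b :: t) h' (by simp)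
    rw [List.getLast_cons (by simp)]
    rcases List.mem_cons.1 hy with rfl | hy
    · exact le_trans ((List.pairwise_cons.1 h).1 b (by simp)) (ih b (by simp))
    · exact ih y hy

/-- Core: for a sorted nonempty list the number of adjacent gaps > 1 equals the number of
    distinct elements other than the head whose predecessor is absent. -/
lemma gap_count : ∀ (L : List Int), L.Pairwise (· ≤ ·) → ∀ (hne : L ≠ []),
    (diffs L).countP (fun g => decide (1 < g))
      = (L.toFinset.filter (fun x => x ≠ L.head hne ∧ x - 1 ∉ L.toFinset)).card
  | [], _, hne => absurd rfl hne
  | [a], _, _ => by simp [diffs, Finset.filter_singleton]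
  | a :: b :: t, h, _ => by
    have hab : a ≤ b := (List.pairwise_cons.1 h).1 b (by simp)
    have h' : (b :: t).Pairwise (· ≤ ·) := (List.pairwise_cons.1 h).2
    have hbt : ∀ x ∈ b :: t, b ≤ x := by
      intro x hx
      rcases List.mem_cons.1 hx with rfl | hx
      · exact le_refl x
      · exact (List.pairwise_cons.1 h').1 x hx
    have ih := gap_count (b :: t) h' (by simp)
    simp only [diffs, List.countP_cons]
    rcases eq_or_lt_of_le hab with rfl | hlt
    · have hset : (a :: a :: t).toFinset = (a :: t).toFinset := by simp
      rw [ih]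
      simp only [List.head_cons, hset]
      simp
    · have hsetL : (a :: b :: t).toFinset = insert a ((b :: t).toFinset) := by simp
      have hA : ∀ x ∈ (b :: t).toFinset, b ≤ x := fun x hx => hbt x (List.mem_toFinset.1 hx)
      have hbnotmem : b - 1 ∉ (b :: t).toFinset := fun hmem => by have := hA _ hmem; omega
      have hbmem : b ∈ (b :: t).toFinset := by simp
      have key : ((a :: b :: t).toFinset.filter
            (fun x => x ≠ (a :: b :: t).head (by simp) ∧ x - 1 ∉ (a :: b :: t).toFinset))
          = (if 1 < b - a then insert b ((b :: t).toFinset.filter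
              (fun x => x ≠ (b :: t).head (by simp) ∧ x - 1 ∉ (b :: t).toFinset))
             else ((b :: t).toFinset.filter
              (fun x => x ≠ (b :: t).head (by simp) ∧ x - 1 ∉ (b :: t).toFinset))) := by
        ext x
        simp only [List.head_cons, Finset.mem_filter, hsetL, Finset.mem_insert]
        by_cases hxS : x ∈ (b :: t).toFinset
        · have hbx : b ≤ x := hA x hxS
          by_cases hxb : x = b
          · subst hxb
            split_ifs with hgap
            · simp only [Finset.mem_insert, Finset.mem_filter]
              constructor
              · intro _; exact Or.inl (by simp)
              · intro _
                refine ⟨Or.inr hxS, by omega, ?_⟩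
                intro hc
                rcases hc with hc | hc
                · omega
                · exact hbnotmem hc
            · simp only [Finset.mem_filter]
              constructor
              · rintro ⟨-, -, hno⟩
                exfalso; apply hno; left; omega
              · rintro ⟨-, hne, -⟩; exact absurd rfl hne
          · have hxgt : b < x := lt_of_le_of_ne hbx (Ne.symm hxb)
            have hx1a : x - 1 ≠ a := by omega
            have : (x = a ∨ x ∈ (b :: t).toFinset) ∧ x ≠ a ∧ ¬(x - 1 = a ∨ x - 1 ∈ (b :: t).toFinset)
                ↔ (x ∈ (b :: t).toFinset ∧ x ≠ b ∧ x - 1 ∉ (b :: t).toFinset) := by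
              constructor
              · rintro ⟨-, -, hno⟩
                exact ⟨hxS, hxb, fun hc => hno (Or.inr hc)⟩
              · rintro ⟨-, -, hno⟩
                refine ⟨Or.inr hxS, by omega, ?_⟩
                rintro (hc | hc)
                · exact hx1a hc
                · exact hno hc
            rw [this]
            split_ifs with hgap
            · simp only [Finset.mem_insert, Finset.mem_filter]
              constructor
              · intro hx; exact Or.inr hx
              · rintro (rfl | hx)
                · exact absurd rfl hxb
                · exact hx
            · simp only [Finset.mem_filter]
        · split_ifs with hgap <;>
            simp only [Finset.mem_insert, Finset.mem_filter] <;>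
            constructor
          · rintro ⟨hor, hne, -⟩
            rcases hor with rfl | hm
            · exact absurd rfl hne
            · exact absurd hm hxS
          · rintro (rfl | ⟨hm, -⟩)
            · exact absurd hbmem hxS
            · exact absurd hm hxS
          · rintro ⟨hor, hne, -⟩
            rcases hor with rfl | hm
            · exact absurd rfl hne
            · exact absurd hm hxS
          · rintro ⟨hm, -⟩
            exact absurd hm hxS
      rw [key]
      have hbF : b ∉ ((b :: t).toFinset.filter
          (fun x => x ≠ (b :: t).head (by simp) ∧ x - 1 ∉ (b :: t).toFinset)) := by
        simp
      rw [ih]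
      by_cases hgap : 1 < b - a
      · rw [if_pos hgap, Finset.card_insert_of_notMem hbF]
        simp [hgap]
      · rw [if_neg hgap]
        simp [hgap]

-- ===== VERDICT (by name: the statement is the Claim_ definition above) =====
theorem are_contiguous_spec : Claim_equal_are_contiguous := by
  intro seats capacity _
  unfold Spec_are_contiguous are_contiguous are_contiguous_alt
  by_cases hlen : seats.length ≤ 1
  · simp [hlen]
  · rw [if_neg hlen, if_neg hlen]
    have hneS : seats ≠ [] := by intro h; subst h; simp at hlen
    set L := PySem.List.sorted seats (fun x => x) false with hL
    have hperm : L.Perm seats := PySem.List.sorted_perm seats (fun x => x) false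
    have hpw : L.Pairwise (· ≤ ·) := PySem.List.sorted_pairwise seats (fun x => x)
    have hneL : L ≠ [] := fun h => hneS ((PySem.List.sorted_eq_nil_iff _ _ _).1 h)
    have hlenL : L.length = seats.length := hperm.length_eq
    have hmemL : ∀ x : Int, x ∈ L ↔ x ∈ seats := fun x => hperm.mem_iff
    -- heads and lasts
    have hmono : ∀ y ∈ L, L.head hneL ≤ y ∧ y ≤ L.getLast hneL := fun y hy =>
      ⟨pairwise_head_le L hpw hneL y hy, pairwise_le_getLast L hpw hneL y hy⟩
    have hlo : (PySem.List.min? seats (fun x => x)).getD 0 = L.head hneL := by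
      obtain ⟨m, hm⟩ : ∃ m, PySem.List.min? seats (fun x => x) = some m := by
        cases hmm : PySem.List.min? seats (fun x => x) with
        | none => exact absurd ((PySem.List.min?_eq_none_iff _ _).1 hmm) hneS
        | some m => exact ⟨m, rfl⟩
      rw [hm]
      have h1 : m ≤ L.head hneL :=
        PySem.List.min?_isMin hm _ ((hmemL _).1 (List.head_mem hneL))
      have h2 : L.head hneL ≤ m :=
        (hmono m ((hmemL m).2 (PySem.List.min?_mem hm))).1
      simpa using le_antisymm h1 h2
    have hhi : (PySem.List.max? seats (fun x => x)).getD 0 = L.getLast hneL := by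
      obtain ⟨m, hm⟩ : ∃ m, PySem.List.max? seats (fun x => x) = some m := by
        cases hmm : PySem.List.max? seats (fun x => x) with
        | none => exact absurd ((PySem.List.max?_eq_none_iff _ _).1 hmm) hneS
        | some m => exact ⟨m, rfl⟩
      rw [hm]
      have h1 : L.getLast hneL ≤ m :=
        PySem.List.max?_isMax hm _ ((hmemL _).1 (List.getLast_mem hneL))
      have h2 : m ≤ L.getLast hneL :=
        (hmono m ((hmemL m).2 (PySem.List.max?_mem hm))).2
      simpa using le_antisymm h2 h1
    -- A-side shape: range-map is diffs L
    have hrange : PySem.List.pyRange 0 ((L.length : Int) - 1) 1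
        = (List.range (L.length - 1)).map (fun (k : Nat) => (k : Int)) := by
      rw [PySem.List.pyRange_one]
      have : ((L.length : Int) - 1 - 0).toNat = L.length - 1 := by omega
      rw [this]
      apply List.map_congr_left
      intro k _
      simp
    have hmapdiffs : (PySem.List.pyRange 0 ((L.length : Int) - 1) 1).map
        (fun i => PySem.List.pyGetD L (i + 1) 0 - PySem.List.pyGetD L i 0) = diffs L := by
      rw [hrange, List.map_map, ← range_map_diffs L]
      apply List.map_congr_left
      intro k hk
      have h1 : ((k : Int) + 1) = ((k + 1 : Nat) : Int) := by push_cast; ring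
      show PySem.List.pyGetD L ((k:Int) + 1) 0 - PySem.List.pyGetD L (k:Int) 0 = L.getD (k + 1) 0 - L.getD k 0
      rw [h1, PySem.List.pyGetD_natCast, PySem.List.pyGetD_natCast]
    have hgaps : (PySem.List.pyRange 0 ((L.length : Int) - 1) 1).foldl
        (fun acc i => acc ++ [PySem.List.pyGetD L (i + 1) 0 - PySem.List.pyGetD L i 0]) []
        = diffs L := by
      rw [PySem.List.foldl_append_singleton_eq_map]; simpa using hmapdiffs
    have hnormal : ((PySem.List.pyRange 0 ((L.length : Int) - 1) 1).all
        (fun i => PySem.List.pyGetD L (i + 1) 0 - PySem.List.pyGetD L i 0 == 1))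
        = (diffs L).all (fun g => g == 1) := by
      rw [← hmapdiffs, List.all_map]; rfl
    -- B-side count
    have hcount : (PySem.Set.ofList seats).foldl
        (fun acc s => if s ≠ L.head hneL ∧ s - 1 ∉ (PySem.Set.ofList seats : PySem.Set Int) then acc + 1 else acc) (0:Int)
        = ((L.toFinset.filter (fun x => x ≠ L.head hneL ∧ x - 1 ∉ L.toFinset)).card : Int) := by
      rw [PySem.List.foldl_ite_add_one]
      have hnd : (PySem.Set.ofList seats : List Int).Nodup := PySem.Set.nodup_ofList seats
      have hsets : (PySem.Set.ofList seats : List Int).toFinset = L.toFinset := by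
        ext x
        simp [List.mem_toFinset, PySem.Set.mem_ofList, hmemL]
      have hcnt : (PySem.Set.ofList seats : List Int).countP
          (fun x => decide (x ≠ L.head hneL ∧ x - 1 ∉ (PySem.Set.ofList seats : PySem.Set Int)))
          = (L.toFinset.filter (fun x => x ≠ L.head hneL ∧ x - 1 ∉ L.toFinset)).card := by
        rw [List.countP_eq_length_filter, ← List.toFinset_card_of_nodup (hnd.filter _),
          List.toFinset_filter, hsets]
        congr 1
        apply Finset.filter_congr
        intro x hx
        simp only [decide_eq_true_eq]
        constructor
        · rintro ⟨h1, h2⟩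
          exact ⟨h1, fun hc => h2 (by rw [← hsets] at hc; simpa [PySem.Set.mem_ofList] using (List.mem_toFinset.1 hc))⟩
        · rintro ⟨h1, h2⟩
          exact ⟨h1, fun hc => h2 (by rw [← hsets]; exact List.mem_toFinset.2 hc)⟩
      rw [hcnt]
      simp
    have hgc := gap_count L hpw hneL
    have hget0 : PySem.List.pyGetD L 0 0 = L.head hneL := by
      obtain ⟨a, t, hat⟩ := List.exists_cons_of_ne_nil hneL
      simp only [hat, PySem.List.pyGetD_zero_cons, List.head_cons]
    dsimp only
    rw [hnormal, hgaps, hlo, hhi, hcount, PySem.List.pyGetD_neg_one L 0 hneL, hget0]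
    by_cases hall : (diffs L).all (fun g => g == 1) = true
    · rw [if_pos hall]
      have hzero : (diffs L).countP (fun g => decide (1 < g)) = 0 := by
        rw [List.countP_eq_zero]
        intro g hg
        have h1 := List.all_eq_true.1 hall g hg
        simp only [beq_iff_eq] at h1
        simp [h1]
      rw [hzero] at hgc
      symm
      rw [decide_eq_true_eq, ← hgc]
      split_ifs <;> simp
    · rw [if_neg hall, decide_eq_decide]
      have hsplit : ((((diffs L) ++ [capacity - L.getLast hneL + L.head hneL]).filter
            (fun g => decide (1 < g))).length : Int)
          = ((diffs L).countP (fun g => decide (1 < g)) : Int)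
            + (if 1 < capacity - L.getLast hneL + L.head hneL then 1 else 0) := by
        rw [List.filter_append, List.length_append, ← List.countP_eq_length_filter,
          List.filter_singleton]
        split_ifs with h
        · simp [h]
        · simp [h]
      rw [hsplit, hgc]
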